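-- pv_equiv track=rewrite | github.com/ibrahimbayburtlu/LeetCode | 2293-min-max-game/2293-min-max-game.py | minMaxGame
-- ===== SOURCE A (Python) =====
-- from typing import List
--
-- def minMaxGame(nums: List[int]) -> int:
--     while 1 < len(nums):
--             newnums = []
--             for i in range(len(nums)//2):
--                     if i % 2 == 1:
--                             newnums.append(max(nums[2*i],nums[2*i+1]))
--                     else:
--                             newnums.append(min(nums[2*i],nums[2*i+1]))
--             nums = newnums
--     return nums[0]
-- ===== SOURCE B (Python) =====
-- def minMaxGame(nums):
--     if len(nums) <= 1:
--         return nums[0]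
--     reduced = [max(nums[2*i], nums[2*i+1]) if i % 2 else min(nums[2*i], nums[2*i+1])
--                for i in range(len(nums)//2)]
--     return minMaxGame(reduced)
-- ===== Notes on version B (the rewrite author's own statement) =====
-- stated objective: simpler
-- what changed: Replaces A's while-loop with explicit append-accumulator by a recursive formulation: each round is built as a single list comprehension and the function recurses on it until one element remains.
import Mathlib
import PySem

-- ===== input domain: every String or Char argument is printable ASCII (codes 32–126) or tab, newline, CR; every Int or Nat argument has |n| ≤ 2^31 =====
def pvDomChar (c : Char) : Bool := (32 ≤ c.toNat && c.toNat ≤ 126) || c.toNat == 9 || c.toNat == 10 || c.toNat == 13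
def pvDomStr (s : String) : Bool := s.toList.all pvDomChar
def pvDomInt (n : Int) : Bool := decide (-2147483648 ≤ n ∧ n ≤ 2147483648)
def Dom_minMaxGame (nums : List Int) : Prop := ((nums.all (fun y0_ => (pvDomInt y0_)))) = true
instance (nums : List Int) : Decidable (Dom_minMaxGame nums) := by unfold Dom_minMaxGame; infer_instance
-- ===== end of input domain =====

-- B replaces A's while loop (append-accumulator per round) by recursion on a comprehension-built round; return value only.

-- ===== PORT A =====
-- one round of A's inner for-loop: append min/max of each pair into newnums
def pvStepA (nums : List Int) : List Int :=
  (List.range (nums.length / 2)).foldl (fun newnums i =>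
    newnums ++ [if i % 2 == 1 then max (nums.getD (2*i) 0) (nums.getD (2*i+1) 0)
                else min (nums.getD (2*i) 0) (nums.getD (2*i+1) 0)]) []

theorem pvStepA_length (nums : List Int) : (pvStepA nums).length = nums.length / 2 := by
  unfold pvStepA
  generalize nums.length / 2 = n
  have h : ∀ (l : List Nat) (acc : List Int),
      (l.foldl (fun newnums i =>
        newnums ++ [if i % 2 == 1 then max (nums.getD (2*i) 0) (nums.getD (2*i+1) 0)
                    else min (nums.getD (2*i) 0) (nums.getD (2*i+1) 0)]) acc).length
      = acc.length + l.length := by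
    intro l
    induction l with
    | nil => intro acc; simp
    | cons x xs ih =>
        intro acc; rw [List.foldl_cons, ih]; simp; omega
  simpa using h (List.range n) []

-- while 1 < len(nums): nums = round(nums); return nums[0]  (nums[0] on [] raises → Pre_)
def minMaxGame (nums : List Int) : Int :=
  if _h : 1 < nums.length then minMaxGame (pvStepA nums)
  else nums.getD 0 0
termination_by nums.length
decreasing_by simp [pvStepA_length]; omega

-- ===== PORT B =====
def minMaxGame_alt (nums : List Int) : Int :=
  if _h : nums.length ≤ 1 then nums.getD 0 0
  else minMaxGame_alt ((List.range (nums.length / 2)).map (fun i =>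
    if i % 2 == 1 then max (nums.getD (2*i) 0) (nums.getD (2*i+1) 0)
    else min (nums.getD (2*i) 0) (nums.getD (2*i+1) 0)))
termination_by nums.length
decreasing_by simp; omega

-- ===== PRECONDITION & SPEC =====
-- A (and B) raise IndexError on the empty list (nums[0]); Pre_ excludes exactly that.
def Pre_minMaxGame (nums : List Int) : Prop := nums ≠ []
instance (nums : List Int) : Decidable (Pre_minMaxGame nums) := by unfold Pre_minMaxGame; infer_instance
def pvWitness_minMaxGame : List Int := ([3, 1, 4, 1])

def Spec_minMaxGame (nums : List Int) (out : Int) : Prop := out = minMaxGame_alt nums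
instance (nums : List Int) (out : Int) : Decidable (Spec_minMaxGame nums out) := by unfold Spec_minMaxGame; infer_instance

-- ===== CLAIM (what is proved, stated in full; the proofs are below) =====
def Claim_equal_minMaxGame : Prop := ∀ (nums : List Int), Dom_minMaxGame nums → Pre_minMaxGame nums → Spec_minMaxGame nums (minMaxGame nums)

-- ===== LEMMAS AND PROOFS =====
-- A's fold-with-append round equals B's map-built round
theorem pvFoldlAppSingleton (f : Nat → Int) : ∀ (l : List Nat) (acc : List Int),
    l.foldl (fun a i => a ++ [f i]) acc = acc ++ l.map f := by
  intro l
  induction l with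
  | nil => intro acc; simp
  | cons x xs ih => intro acc; rw [List.foldl_cons, ih, List.map_cons]; simp

theorem pvStepA_eq_map (nums : List Int) :
    pvStepA nums = (List.range (nums.length / 2)).map (fun i =>
      if i % 2 == 1 then max (nums.getD (2*i) 0) (nums.getD (2*i+1) 0)
      else min (nums.getD (2*i) 0) (nums.getD (2*i+1) 0)) := by
  unfold pvStepA
  simpa using pvFoldlAppSingleton
    (fun i => if i % 2 == 1 then max (nums.getD (2*i) 0) (nums.getD (2*i+1) 0)
      else min (nums.getD (2*i) 0) (nums.getD (2*i+1) 0))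
    (List.range (nums.length / 2)) []

theorem minMaxGame_agree (nums : List Int) (h : nums ≠ []) :
    minMaxGame nums = minMaxGame_alt nums := by
  have hlen : 0 < nums.length := List.length_pos_of_ne_nil h
  clear h
  induction hn : nums.length using Nat.strong_induction_on generalizing nums with
  | _ n ih =>
    subst hn
    by_cases h1 : 1 < nums.length
    · rw [minMaxGame, minMaxGame_alt]
      simp only [h1, dif_pos]
      rw [dif_neg (by omega)]
      rw [pvStepA_eq_map]
      exact ih ((pvStepA nums).length)
        (by rw [pvStepA_length]; omega)
        _ (by rw [← pvStepA_eq_map, pvStepA_length]; omega)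
        (by rw [← pvStepA_eq_map])
    · rw [minMaxGame, minMaxGame_alt]
      rw [dif_neg h1, dif_pos (by omega)]

-- ===== VERDICT (by name: the statement is the Claim_ definition above) =====
theorem minMaxGame_spec : Claim_equal_minMaxGame := by
  intro nums _ hpre
  exact minMaxGame_agree nums hpre
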